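-- pv_equiv track=rewrite | github.com/Razzit/Slapstats-For-Streamers | SlapStats.py | tally_statistics
-- ===== SOURCE A (Python) =====
-- Stats_Key = "stats"
--
-- Shots_key = "shots"
--
-- Saves_key = "saves"
--
-- FaceoffsWon_key = "faceoffs_won"
--
-- Takeaways_key = "takeaways"
--
-- Passes_key = "passes"
--
-- PossessionTime_key = "possession_time_sec"
--
-- def tally_statistics(players, teamName):
--     shots = 0
--     saves = 0
--     faceoffsWon = 0
--     takeaways = 0
--     passes = 0
--     possessionTime = 0
--
--     for player in players:
--         stats = player[Stats_Key]
--         #Check that keys exist, then append.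
--         if Shots_key in stats:
--             shots += int(player[Stats_Key][Shots_key])
--         if Saves_key in stats:
--             saves += int(player[Stats_Key][Saves_key])
--         if FaceoffsWon_key in stats:
--             faceoffsWon += int(player[Stats_Key][FaceoffsWon_key])
--         if Takeaways_key in stats:
--             takeaways += int(player[Stats_Key][Takeaways_key])
--         if Passes_key in stats:
--             passes += int(player[Stats_Key][Passes_key])
--         if PossessionTime_key in stats:
--             possessionTime += int(player[Stats_Key][PossessionTime_key])
--
--     #Return dictionary of stats
--     return { Shots_key: shots,
--              Saves_key: saves,
--              FaceoffsWon_key: faceoffsWon,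
--              Takeaways_key: takeaways,
--              Passes_key: passes,
--              PossessionTime_key: possessionTime
--             }
-- ===== SOURCE B (Python) =====
-- Stats_Key = "stats"
-- Shots_key = "shots"
-- Saves_key = "saves"
-- FaceoffsWon_key = "faceoffs_won"
-- Takeaways_key = "takeaways"
-- Passes_key = "passes"
-- PossessionTime_key = "possession_time_sec"
--
-- def tally_statistics(players, teamName):
--     def total(key):
--         return sum(int(p[Stats_Key][key]) for p in players if key in p[Stats_Key])
--     return {key: total(key)
--             for key in (Shots_key, Saves_key, FaceoffsWon_key,
--                         Takeaways_key, Passes_key, PossessionTime_key)}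
-- ===== Notes on version B (the rewrite author's own statement) =====
-- stated objective: alternative
-- what changed: A's single fused loop with six accumulators is replaced by six independent single-field passes (one generator-expression sum per stat) and a dict comprehension over the six keys.
import Mathlib
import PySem

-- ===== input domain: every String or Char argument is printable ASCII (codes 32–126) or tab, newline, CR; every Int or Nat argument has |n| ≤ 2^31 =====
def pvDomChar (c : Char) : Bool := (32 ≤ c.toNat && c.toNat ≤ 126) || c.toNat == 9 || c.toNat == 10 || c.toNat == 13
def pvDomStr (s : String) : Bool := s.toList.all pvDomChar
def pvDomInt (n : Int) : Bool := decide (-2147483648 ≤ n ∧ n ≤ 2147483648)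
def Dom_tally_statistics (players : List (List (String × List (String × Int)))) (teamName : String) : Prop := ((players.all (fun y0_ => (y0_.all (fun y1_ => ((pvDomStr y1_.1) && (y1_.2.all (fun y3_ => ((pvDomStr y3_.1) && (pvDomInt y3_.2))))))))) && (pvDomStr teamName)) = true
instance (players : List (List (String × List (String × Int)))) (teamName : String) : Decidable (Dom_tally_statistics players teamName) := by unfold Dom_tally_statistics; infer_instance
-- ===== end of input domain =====

-- B replaces A's single fused six-accumulator loop by six independent one-field passes (objective: alternative decomposition).

-- ===== PORT A =====
-- A's loop body: six conditional accumulations into a 6-tuple of running totals.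
def tallyStep (acc : Int × Int × Int × Int × Int × Int)
    (player : List (String × List (String × Int))) : Int × Int × Int × Int × Int × Int :=
  let stats := ((PySem.Dict.mk player).get? "stats").getD []
  let shots := match (PySem.Dict.mk stats).get? "shots" with
    | some v => acc.1 + v | none => acc.1
  let saves := match (PySem.Dict.mk stats).get? "saves" with
    | some v => acc.2.1 + v | none => acc.2.1
  let faceoffsWon := match (PySem.Dict.mk stats).get? "faceoffs_won" with
    | some v => acc.2.2.1 + v | none => acc.2.2.1
  let takeaways := match (PySem.Dict.mk stats).get? "takeaways" with
    | some v => acc.2.2.2.1 + v | none => acc.2.2.2.1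
  let passes := match (PySem.Dict.mk stats).get? "passes" with
    | some v => acc.2.2.2.2.1 + v | none => acc.2.2.2.2.1
  let possessionTime := match (PySem.Dict.mk stats).get? "possession_time_sec" with
    | some v => acc.2.2.2.2.2 + v | none => acc.2.2.2.2.2
  (shots, saves, faceoffsWon, takeaways, passes, possessionTime)

def tally_statistics (players : List (List (String × List (String × Int)))) (teamName : String) : List (String × Int) :=
  let r := players.foldl tallyStep (0, 0, 0, 0, 0, 0)
  [("shots", r.1), ("saves", r.2.1), ("faceoffs_won", r.2.2.1),
   ("takeaways", r.2.2.2.1), ("passes", r.2.2.2.2.1), ("possession_time_sec", r.2.2.2.2.2)]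

-- ===== PORT B =====
-- B's per-key single-field pass: sum(int(p["stats"][key]) for p in players if key in p["stats"])
def statStep (key : String) (s : Int) (player : List (String × List (String × Int))) : Int :=
  match (PySem.Dict.mk (((PySem.Dict.mk player).get? "stats").getD [])).get? key with
  | some v => s + v
  | none => s

def statTotal (players : List (List (String × List (String × Int)))) (key : String) : Int :=
  players.foldl (statStep key) 0

def tally_statistics_alt (players : List (List (String × List (String × Int)))) (teamName : String) : List (String × Int) :=
  ["shots", "saves", "faceoffs_won", "takeaways", "passes", "possession_time_sec"].map
    (fun key => (key, statTotal players key))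

-- ===== PRECONDITION & SPEC =====
-- Pre_ excludes players without a "stats" entry: there the Python A (and B) raises KeyError.
def Pre_tally_statistics (players : List (List (String × List (String × Int)))) (teamName : String) : Prop :=
  ∀ p ∈ players, ((PySem.Dict.mk p).get? "stats").isSome = true
instance (players : List (List (String × List (String × Int)))) (teamName : String) : Decidable (Pre_tally_statistics players teamName) := by unfold Pre_tally_statistics; infer_instance

def pvWitness_tally_statistics : (List (List (String × List (String × Int)))) × String :=
  ([[("stats", [("shots", 2), ("passes", 1)])], [("stats", [("saves", 3)])]], "team")

def Spec_tally_statistics (players : List (List (String × List (String × Int)))) (teamName : String) (out : List (String × Int)) : Prop := out = tally_statistics_alt players teamName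
instance (players : List (List (String × List (String × Int)))) (teamName : String) (out : List (String × Int)) : Decidable (Spec_tally_statistics players teamName out) := by unfold Spec_tally_statistics; infer_instance

-- ===== CLAIM (what is proved, stated in full; the proofs are below) =====
def Claim_equal_tally_statistics : Prop := ∀ (players : List (List (String × List (String × Int)))) (teamName : String), Dom_tally_statistics players teamName → Pre_tally_statistics players teamName → Spec_tally_statistics players teamName (tally_statistics players teamName)

-- ===== LEMMAS AND PROOFS =====

-- The value a single player contributes for one key (0 when the key is absent).
def delta (player : List (String × List (String × Int))) (key : String) : Int :=
  ((PySem.Dict.mk (((PySem.Dict.mk player).get? "stats").getD [])).get? key).getD 0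

lemma statStep_eq (key : String) (s : Int) (p : List (String × List (String × Int))) :
    statStep key s p = s + delta p key := by
  unfold statStep delta
  cases (PySem.Dict.mk (((PySem.Dict.mk p).get? "stats").getD [])).get? key <;> simp

lemma statStep_shift (key : String) (l : List (List (String × List (String × Int)))) (s : Int) :
    l.foldl (statStep key) s = s + l.foldl (statStep key) 0 := by
  induction l generalizing s with
  | nil => simp
  | cons q t ih =>
    simp only [List.foldl_cons]
    rw [ih (statStep key s q), ih (statStep key 0 q), statStep_eq, statStep_eq]
    ring

lemma statTotal_cons (p : List (String × List (String × Int)))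
    (l : List (List (String × List (String × Int)))) (key : String) :
    statTotal (p :: l) key = delta p key + statTotal l key := by
  simp only [statTotal, List.foldl_cons]
  rw [statStep_shift, statStep_eq]
  ring

lemma tallyStep_eq (acc : Int × Int × Int × Int × Int × Int)
    (p : List (String × List (String × Int))) :
    tallyStep acc p =
      (acc.1 + delta p "shots", acc.2.1 + delta p "saves",
       acc.2.2.1 + delta p "faceoffs_won", acc.2.2.2.1 + delta p "takeaways",
       acc.2.2.2.2.1 + delta p "passes", acc.2.2.2.2.2 + delta p "possession_time_sec") := by
  unfold tallyStep
  simp [delta]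
  constructor
  · cases (PySem.Dict.mk (((PySem.Dict.mk p).get? "stats").getD [])).get? "shots" <;> simp
  constructor
  · cases (PySem.Dict.mk (((PySem.Dict.mk p).get? "stats").getD [])).get? "saves" <;> simp
  constructor
  · cases (PySem.Dict.mk (((PySem.Dict.mk p).get? "stats").getD [])).get? "faceoffs_won" <;> simp
  constructor
  · cases (PySem.Dict.mk (((PySem.Dict.mk p).get? "stats").getD [])).get? "takeaways" <;> simp
  constructor
  · cases (PySem.Dict.mk (((PySem.Dict.mk p).get? "stats").getD [])).get? "passes" <;> simp
  · cases (PySem.Dict.mk (((PySem.Dict.mk p).get? "stats").getD [])).get? "possession_time_sec" <;> simp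

lemma foldl_tallyStep (l : List (List (String × List (String × Int))))
    (a : Int × Int × Int × Int × Int × Int) :
    l.foldl tallyStep a =
      (a.1 + statTotal l "shots", a.2.1 + statTotal l "saves",
       a.2.2.1 + statTotal l "faceoffs_won", a.2.2.2.1 + statTotal l "takeaways",
       a.2.2.2.2.1 + statTotal l "passes", a.2.2.2.2.2 + statTotal l "possession_time_sec") := by
  induction l generalizing a with
  | nil => simp [statTotal]
  | cons p t ih =>
    simp only [List.foldl_cons, ih, tallyStep_eq, statTotal_cons]
    simp only [Prod.mk.injEq]
    refine ⟨by ring, by ring, by ring, by ring, by ring, by ring⟩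

-- ===== VERDICT (by name: the statement is the Claim_ definition above) =====
theorem tally_statistics_spec : Claim_equal_tally_statistics := by
  intro players teamName _ _
  unfold Spec_tally_statistics tally_statistics tally_statistics_alt
  simp [foldl_tallyStep]
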